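-- pv_equiv track=rewrite | github.com/shivanshsinghx365/Practice | Practice Questions/Site/Geeksforgeeks/Easy/Neighbour of 10.py | isNeighbour
-- ===== SOURCE A (Python) =====
-- def isNeighbour(N):
--     ##Your code here
--     k=0
--     for i in range(N-2,N+3):
--         if i%10==0:
--             k=1
--     if k==1:
--         return True
--     else:
--         return False
-- ===== SOURCE B (Python) =====
-- def isNeighbour(N):
--     return N % 10 in (0, 1, 2, 8, 9)
-- ===== Notes on version B (the rewrite author's own statement) =====
-- stated objective: simpler
-- what changed: Replaced the 5-iteration loop with a flag by a single modulo test: a multiple of 10 lies in [N-2, N+2] iff N % 10 is one of {0,1,2,8,9}.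
import Mathlib
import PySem

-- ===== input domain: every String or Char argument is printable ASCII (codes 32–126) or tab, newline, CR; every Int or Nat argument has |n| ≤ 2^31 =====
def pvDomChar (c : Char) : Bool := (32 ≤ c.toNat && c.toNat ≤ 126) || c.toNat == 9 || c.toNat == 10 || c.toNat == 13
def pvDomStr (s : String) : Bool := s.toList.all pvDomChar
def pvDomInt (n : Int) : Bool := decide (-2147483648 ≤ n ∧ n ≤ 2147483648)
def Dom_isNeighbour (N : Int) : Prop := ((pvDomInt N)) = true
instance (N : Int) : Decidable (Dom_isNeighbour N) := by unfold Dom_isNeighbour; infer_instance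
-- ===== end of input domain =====

-- B replaces A's 5-iteration loop with a single last-digit test (simpler, no loop).


-- ===== PORT A =====
def isNeighbour (N : Int) : Bool :=
  let k : Int :=
    (PySem.List.pyRange (N - 2) (N + 3) 1).foldl
      (fun k i => if PySem.Int.mod i 10 = 0 then 1 else k) 0
  if k = 1 then true else false

-- ===== PORT B =====
def isNeighbour_alt (N : Int) : Bool :=
  decide (PySem.Int.mod N 10 ∈ ([0, 1, 2, 8, 9] : List Int))

-- ===== PRECONDITION & SPEC =====
def Spec_isNeighbour (N : Int) (out : Bool) : Prop := out = isNeighbour_alt N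
instance (N : Int) (out : Bool) : Decidable (Spec_isNeighbour N out) := by unfold Spec_isNeighbour; infer_instance

-- ===== CLAIM (what is proved, stated in full; the proofs are below) =====
def Claim_equal_isNeighbour : Prop := ∀ (N : Int), Dom_isNeighbour N → Spec_isNeighbour N (isNeighbour N)

-- ===== LEMMAS AND PROOFS =====

theorem pyRange_five (N : Int) :
    PySem.List.pyRange (N - 2) (N + 3) 1 = [N - 2, N - 1, N, N + 1, N + 2] := by
  rw [PySem.List.pyRange_one_cons (by omega)]
  rw [PySem.List.pyRange_one_cons (by omega)]
  rw [PySem.List.pyRange_one_cons (by omega)]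
  rw [PySem.List.pyRange_one_cons (by omega)]
  rw [PySem.List.pyRange_one_cons (by omega)]
  have h : PySem.List.pyRange (N + 3) (N + 3) 1 = [] := by
    simp [PySem.List.pyRange]
  rw [show N - 2 + 1 + 1 + 1 + 1 + 1 = N + 3 by ring, h]
  norm_num
  omega

-- ===== VERDICT (by name: the statement is the Claim_ definition above) =====
theorem isNeighbour_spec : Claim_equal_isNeighbour := by
  intro N _
  show isNeighbour N = isNeighbour_alt N
  unfold isNeighbour isNeighbour_alt
  rw [pyRange_five]
  simp only [List.foldl, PySem.Int.mod_eq_emod_of_pos (by omega : (0:Int) < 10),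
    List.mem_cons, List.not_mem_nil, or_false]
  split_ifs <;> simp_all <;> omega
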